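-- pv_equiv track=rewrite | github.com/SZoloth/job-search-maestro | application_generator.py | _optimize_skills_section
-- ===== SOURCE A (Python) =====
-- from typing import Dict, List, Optional, Set
--
-- def _optimize_skills_section(job_analysis: Dict) -> Dict[str, List[str]]:
--     """Optimize skills section based on job analysis."""
--     keywords = job_analysis.get("keywords", {})
--
--     # Base skills organized by category
--     base_skills = {
--         "Product Management": ["Product strategy", "Roadmapping", "User research", "Analytics"],
--         "Technical Skills": ["SQL", "Python", "A/B testing", "Data analysis"],
--         "Tools & Platforms": ["Amplitude", "Mixpanel", "Google Analytics", "Figma"]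
--     }
--
--     # Prioritize skills mentioned in job description
--     optimized_skills = {}
--     for category, skills in base_skills.items():
--         # Reorder skills based on keyword matches
--         tech_keywords = keywords.get("technical_skills", [])
--         tools_keywords = keywords.get("tools_platforms", [])
--
--         relevant_skills = []
--         other_skills = []
--
--         for skill in skills:
--             if (skill.lower() in tech_keywords or skill.lower() in tools_keywords):
--                 relevant_skills.append(skill)
--             else:
--                 other_skills.append(skill)
--
--         # Combine with relevant skills first
--         optimized_skills[category] = relevant_skills + other_skills
--
--     return optimized_skills
-- ===== SOURCE B (Python) =====
-- def _optimize_skills_section(job_analysis):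
--     """Optimize skills section based on job analysis."""
--     keywords = job_analysis.get("keywords", {})
--     wanted = set(keywords.get("technical_skills", [])) | set(keywords.get("tools_platforms", []))
--
--     base_skills = {
--         "Product Management": ["Product strategy", "Roadmapping", "User research", "Analytics"],
--         "Technical Skills": ["SQL", "Python", "A/B testing", "Data analysis"],
--         "Tools & Platforms": ["Amplitude", "Mixpanel", "Google Analytics", "Figma"]
--     }
--
--     return {
--         category: sorted(skills, key=lambda s: 0 if s.lower() in wanted else 1)
--         for category, skills in base_skills.items()
--     }
-- ===== Notes on version B (the rewrite author's own statement) =====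
-- stated objective: idiomatic
-- what changed: Replaces the manual relevant/other partition loop and list concatenation per category with one precomputed keyword set and a single stable sort keyed 0/1 on membership, built in a dict comprehension.
import Mathlib
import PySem

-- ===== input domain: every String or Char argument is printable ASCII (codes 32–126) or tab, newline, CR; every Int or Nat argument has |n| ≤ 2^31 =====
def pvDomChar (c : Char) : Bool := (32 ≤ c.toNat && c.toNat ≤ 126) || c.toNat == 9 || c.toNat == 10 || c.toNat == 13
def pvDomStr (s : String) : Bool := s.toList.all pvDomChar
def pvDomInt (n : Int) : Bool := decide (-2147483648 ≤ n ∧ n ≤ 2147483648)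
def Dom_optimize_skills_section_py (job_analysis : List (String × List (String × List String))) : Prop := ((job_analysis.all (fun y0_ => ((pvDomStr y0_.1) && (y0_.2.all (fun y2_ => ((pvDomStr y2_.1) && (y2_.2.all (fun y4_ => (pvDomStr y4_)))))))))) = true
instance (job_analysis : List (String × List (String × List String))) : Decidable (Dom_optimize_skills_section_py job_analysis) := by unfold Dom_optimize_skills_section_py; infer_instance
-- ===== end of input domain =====

-- B replaces A's per-category relevant/other partition loop with one precomputed
-- keyword set and a single stable 0/1-keyed sort per category (more idiomatic).


-- ===== PORT A =====
def pvBaseSkills : List (String × List String) :=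
  [("Product Management", ["Product strategy", "Roadmapping", "User research", "Analytics"]),
   ("Technical Skills", ["SQL", "Python", "A/B testing", "Data analysis"]),
   ("Tools & Platforms", ["Amplitude", "Mixpanel", "Google Analytics", "Figma"])]

def optimize_skills_section_py (job_analysis : List (String × List (String × List String))) : List (String × List String) :=
  let keywords : List (String × List String) := PySem.Dict.getD ⟨job_analysis⟩ "keywords" []
  let base_skills := pvBaseSkills
  let optimized_skills : PySem.Dict String (List String) :=
    base_skills.foldl (fun acc cs =>
      let tech_keywords := PySem.Dict.getD ⟨keywords⟩ "technical_skills" []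
      let tools_keywords := PySem.Dict.getD ⟨keywords⟩ "tools_platforms" []
      let ro := cs.2.foldl (fun (ro : List String × List String) skill =>
          if tech_keywords.contains (PySem.Str.lower skill)
             || tools_keywords.contains (PySem.Str.lower skill)
          then (ro.1 ++ [skill], ro.2)
          else (ro.1, ro.2 ++ [skill])) ([], [])
      PySem.Dict.insert acc cs.1 (ro.1 ++ ro.2)) PySem.Dict.empty
  optimized_skills.items

-- ===== PORT B =====
def optimize_skills_section_py_alt (job_analysis : List (String × List (String × List String))) : List (String × List String) :=
  let keywords : List (String × List String) := PySem.Dict.getD ⟨job_analysis⟩ "keywords" []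
  let wanted : PySem.Set String :=
    PySem.Set.union (PySem.Set.ofList (PySem.Dict.getD ⟨keywords⟩ "technical_skills" []))
      (PySem.Dict.getD ⟨keywords⟩ "tools_platforms" [])
  let base_skills := pvBaseSkills
  base_skills.map (fun cs =>
    (cs.1, PySem.List.sorted cs.2
      (fun s => if PySem.Set.contains wanted (PySem.Str.lower s) then (0 : Int) else 1) false))

-- ===== PRECONDITION & SPEC =====
def Spec_optimize_skills_section_py (job_analysis : List (String × List (String × List String))) (out : List (String × List String)) : Prop := out = optimize_skills_section_py_alt job_analysis
instance (job_analysis : List (String × List (String × List String))) (out : List (String × List String)) : Decidable (Spec_optimize_skills_section_py job_analysis out) := by unfold Spec_optimize_skills_section_py; infer_instance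

-- ===== CLAIM (what is proved, stated in full; the proofs are below) =====
def Claim_equal_optimize_skills_section_py : Prop := ∀ (job_analysis : List (String × List (String × List String))), Dom_optimize_skills_section_py job_analysis → Spec_optimize_skills_section_py job_analysis (optimize_skills_section_py job_analysis)

-- ===== LEMMAS AND PROOFS =====

-- Stable insertBy with a 0/1 key: with relevant-first accumulator, x lands at the end of its bucket.
theorem insertBy01 {α : Type} (p : α → Bool) (x : α) (rel oth : List α)
    (hrel : ∀ y ∈ rel, p y = true) (hoth : ∀ y ∈ oth, p y = false) :
    PySem.List.insertBy
      (fun a b => decide ((if p a then (0 : Int) else 1) < (if p b then (0 : Int) else 1)))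
      x (rel ++ oth)
      = if p x then (rel ++ [x]) ++ oth else rel ++ (oth ++ [x]) := by
  induction rel with
  | nil =>
    simp only [List.nil_append]
    cases hx : p x with
    | true =>
      cases oth with
      | nil => simp [PySem.List.insertBy]
      | cons z zs =>
        have hz : p z = false := hoth z (by simp)
        simp [PySem.List.insertBy, hx, hz]
    | false =>
      rw [PySem.List.insertBy_of_forall_not_before]
      · simp
      · intro y hy
        cases hpy : p y <;> simp [hx, hpy]
  | cons r rs ih =>
    have hr : p r = true := hrel r (by simp)
    have hx' : decide ((if p x then (0 : Int) else 1) < (if p r then (0 : Int) else 1)) = false := by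
      cases hpx : p x <;> simp [hr]
    simp only [List.cons_append, PySem.List.insertBy, hx', Bool.false_eq_true, if_false]
    rw [ih (fun y hy => hrel y (by simp [hy]))]
    cases p x <;> simp

-- B's insertion-sort fold keeps the accumulator split as "p-true prefix ++ p-false suffix".
theorem foldl_insertBy01 {α : Type} (p : α → Bool) (xs rel oth : List α)
    (hrel : ∀ y ∈ rel, p y = true) (hoth : ∀ y ∈ oth, p y = false) :
    xs.foldl (fun acc x => PySem.List.insertBy
      (fun a b => decide ((if p a then (0 : Int) else 1) < (if p b then (0 : Int) else 1))) x acc)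
      (rel ++ oth)
      = (rel ++ xs.filter p) ++ (oth ++ xs.filter (fun x => !p x)) := by
  induction xs generalizing rel oth with
  | nil => simp
  | cons x xs ih =>
    simp only [List.foldl_cons]
    rw [insertBy01 p x rel oth hrel hoth]
    cases hx : p x with
    | true =>
      have h1 : ∀ y ∈ rel ++ [x], p y = true := by
        intro y hy
        rcases List.mem_append.mp hy with h | h
        · exact hrel y h
        · simp at h; subst h; exact hx
      rw [if_pos rfl, ih (rel ++ [x]) oth h1 hoth]
      simp [List.filter_cons, hx]
    | false =>
      have h2 : ∀ y ∈ oth ++ [x], p y = false := by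
        intro y hy
        rcases List.mem_append.mp hy with h | h
        · exact hoth y h
        · simp at h; subst h; exact hx
      rw [if_neg (by simp), ih rel (oth ++ [x]) hrel h2]
      simp [List.filter_cons, hx]

-- sorted with a 0/1 key is the stable partition.
theorem sorted01 {α : Type} (p : α → Bool) (xs : List α) :
    PySem.List.sorted xs (fun x => if p x then (0 : Int) else 1) false
      = xs.filter p ++ xs.filter (fun x => !p x) := by
  rw [PySem.List.sorted_eq_foldl_insertBy]
  have := foldl_insertBy01 p xs [] [] (by simp) (by simp)
  simpa using this

-- A's partition fold computed in closed form.
theorem foldl_partition {α : Type} (p : α → Bool) (xs : List α) (r o : List α) :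
    xs.foldl (fun (ro : List α × List α) x =>
        if p x then (ro.1 ++ [x], ro.2) else (ro.1, ro.2 ++ [x])) (r, o)
      = (r ++ xs.filter p, o ++ xs.filter (fun x => !p x)) := by
  induction xs generalizing r o with
  | nil => simp
  | cons x xs ih =>
    simp only [List.foldl_cons]
    cases hx : p x <;> simp [hx, ih, List.filter_cons]

-- The two membership tests agree: list-containment in both lists = containment in the union set.
theorem contains_union_eq (tech tools : List String) (s : String) :
    PySem.Set.contains (PySem.Set.union (PySem.Set.ofList tech) tools) s
      = (tech.contains s || tools.contains s) := by
  by_cases h : s ∈ PySem.Set.union (PySem.Set.ofList tech) tools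
  · have h' := (PySem.Set.mem_union _ _ _).mp h
    rw [(PySem.Set.contains_iff _ _).mpr h]
    rcases h' with h' | h'
    · simp [List.contains_iff_mem, (PySem.Set.mem_ofList _ _).mp h']
    · simp [List.contains_iff_mem, h']
  · have hc : PySem.Set.contains (PySem.Set.union (PySem.Set.ofList tech) tools) s = false := by
      cases hcc : PySem.Set.contains (PySem.Set.union (PySem.Set.ofList tech) tools) s
      · rfl
      · exact absurd ((PySem.Set.contains_iff _ _).mp hcc) h
    rw [hc]
    rw [PySem.Set.mem_union, PySem.Set.mem_ofList] at h
    push_neg at h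
    simp [List.contains_iff_mem, h.1, h.2]

-- ===== VERDICT (by name: the statement is the Claim_ definition above) =====
theorem optimize_skills_section_py_spec : Claim_equal_optimize_skills_section_py := by
  intro ja _
  unfold Spec_optimize_skills_section_py optimize_skills_section_py optimize_skills_section_py_alt
  simp only []
  set keywords : List (String × List String) := PySem.Dict.getD ⟨ja⟩ "keywords" [] with hk
  set tech := PySem.Dict.getD (⟨keywords⟩ : PySem.Dict String (List String)) "technical_skills" [] with ht
  set tools := PySem.Dict.getD (⟨keywords⟩ : PySem.Dict String (List String)) "tools_platforms" [] with hto
  have hkey : ∀ s : String,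
      (if PySem.Set.contains (PySem.Set.union (PySem.Set.ofList tech) tools) s then (0 : Int) else 1)
        = (if (tech.contains s || tools.contains s) then (0 : Int) else 1) := by
    intro s; rw [contains_union_eq]
  have hcat : ∀ skills : List String,
      PySem.List.sorted skills
        (fun s => if PySem.Set.contains (PySem.Set.union (PySem.Set.ofList tech) tools)
                      (PySem.Str.lower s) then (0 : Int) else 1) false
      = (skills.foldl (fun (ro : List String × List String) skill =>
          if tech.contains (PySem.Str.lower skill) || tools.contains (PySem.Str.lower skill)
          then (ro.1 ++ [skill], ro.2) else (ro.1, ro.2 ++ [skill])) ([], [])).1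
        ++ (skills.foldl (fun (ro : List String × List String) skill =>
          if tech.contains (PySem.Str.lower skill) || tools.contains (PySem.Str.lower skill)
          then (ro.1 ++ [skill], ro.2) else (ro.1, ro.2 ++ [skill])) ([], [])).2 := by
    intro skills
    have hs : (fun s => if PySem.Set.contains (PySem.Set.union (PySem.Set.ofList tech) tools)
                      (PySem.Str.lower s) then (0 : Int) else 1)
            = (fun s => if ((tech.contains (PySem.Str.lower s) || tools.contains (PySem.Str.lower s)) : Bool)
                        then (0 : Int) else 1) := by
      funext s; exact hkey (PySem.Str.lower s)
    rw [hs, sorted01 (fun s => tech.contains (PySem.Str.lower s) || tools.contains (PySem.Str.lower s)) skills,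
        foldl_partition (fun s => tech.contains (PySem.Str.lower s) || tools.contains (PySem.Str.lower s)) skills [] []]
    simp
  simp only [pvBaseSkills, List.foldl_cons, List.foldl_nil, List.map_cons, List.map_nil]
  rw [hcat, hcat, hcat]
  rfl
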